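-- pv_equiv track=rewrite | github.com/eliottcassidy2000/math | 04-computation/palindromic_n_scalar_m.py | all_tournaments_canonical
-- ===== SOURCE A (Python) =====
-- from itertools import permutations
--
-- def all_tournaments_canonical(n):
--     edges = [(i,j) for i in range(n) for j in range(i+1,n)]
--     seen = set()
--     results = []
--     for bits in range(2**len(edges)):
--         A = [[0]*n for _ in range(n)]
--         for idx, (i,j) in enumerate(edges):
--             if (bits >> idx) & 1: A[i][j] = 1
--             else: A[j][i] = 1
--         key = tuple(tuple(row) for row in A)
--         min_key = key
--         for perm in permutations(range(n)):
--             pkey = tuple(tuple(A[perm[i]][perm[j]] for j in range(n)) for i in range(n))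
--             if pkey < min_key: min_key = pkey
--         if min_key in seen: continue
--         seen.add(min_key)
--         results.append(A)
--     return results
-- ===== SOURCE B (Python) =====
-- from itertools import permutations
--
-- def _isomorphic(A, rep, n):
--     # A ~ rep iff some relabelling perm sends A onto rep entrywise
--     for perm in permutations(range(n)):
--         if all(A[perm[i]][perm[j]] == rep[i][j] for i in range(n) for j in range(n)):
--             return True
--     return False
--
-- def all_tournaments_canonical(n):
--     edges = [(i, j) for i in range(n) for j in range(i + 1, n)]
--     reps = []
--     for bits in range(2 ** len(edges)):
--         A = [[0] * n for _ in range(n)]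
--         for idx, (i, j) in enumerate(edges):
--             if (bits >> idx) & 1:
--                 A[i][j] = 1
--             else:
--                 A[j][i] = 1
--         if not any(_isomorphic(A, rep, n) for rep in reps):
--             reps.append(A)
--     return reps
-- ===== Notes on version B (the rewrite author's own statement) =====
-- stated objective: alternative
-- what changed: Replaced the canonical-form machinery (lexicographic-min key over all permutations plus a seen-set) by a representative list with a pairwise isomorphism test that early-exits as soon as a matching permutation or representative is found.
import Mathlib
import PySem

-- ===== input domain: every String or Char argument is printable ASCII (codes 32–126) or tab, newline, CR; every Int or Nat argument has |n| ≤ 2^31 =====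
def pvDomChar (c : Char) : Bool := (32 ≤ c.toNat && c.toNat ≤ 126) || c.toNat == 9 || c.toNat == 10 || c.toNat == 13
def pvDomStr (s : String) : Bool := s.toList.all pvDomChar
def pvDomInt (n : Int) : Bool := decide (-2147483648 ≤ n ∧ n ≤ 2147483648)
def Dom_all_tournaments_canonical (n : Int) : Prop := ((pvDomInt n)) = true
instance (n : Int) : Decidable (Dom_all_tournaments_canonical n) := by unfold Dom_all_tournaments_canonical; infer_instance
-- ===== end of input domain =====

-- B replaces A's lexicographic-min canonical key + seen-set by a list of representatives
-- with a pairwise early-exit isomorphism test; return values are proved equal.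

-- ===== PORT A =====
-- shared Python text: edges = [(i,j) for i in range(n) for j in range(i+1,n)]
def tcEdges (n : Int) : List (Int × Int) :=
  (PySem.List.pyRange 0 n 1).flatMap (fun i =>
    (PySem.List.pyRange (i + 1) n 1).map (fun j => (i, j)))

-- shared Python text: A = [[0]*n for _ in range(n)]; for idx,(i,j) in enumerate(edges): …
def tcBuild (n : Int) (edges : List (Int × Int)) (bits : Int) : List (List Int) :=
  (PySem.List.enumerate edges 0).foldl (fun A e =>
    if PySem.Int.band (bits >>> e.1.toNat) 1 = 1 then
      PySem.List.pySetD A e.2.1 (PySem.List.pySetD (PySem.List.pyGetD A e.2.1 []) e.2.2 1)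
    else
      PySem.List.pySetD A e.2.2 (PySem.List.pySetD (PySem.List.pyGetD A e.2.2 []) e.2.1 1))
    ((PySem.List.pyRange 0 n 1).map (fun _ => List.replicate n.toNat (0 : Int)))

-- shared Python text: permutations(range(n))
def tcPerms (n : Int) : List (List Int) :=
  PySem.List.permutations (PySem.List.pyRange 0 n 1) (PySem.List.pyRange 0 n 1).length

-- shared Python text: A[perm[i]][perm[j]]
def tcEntry (A : List (List Int)) (p : List Int) (i j : Int) : Int :=
  PySem.List.pyGetD (PySem.List.pyGetD A (PySem.List.pyGetD p i 0) [])
    (PySem.List.pyGetD p j 0) 0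

-- A only: pkey = tuple(tuple(A[perm[i]][perm[j]] for j in range(n)) for i in range(n))
def tcPkey (n : Int) (A : List (List Int)) (p : List Int) : List (List Int) :=
  (PySem.List.pyRange 0 n 1).map (fun i =>
    (PySem.List.pyRange 0 n 1).map (fun j => tcEntry A p i j))

def all_tournaments_canonical (n : Int) : List (List (List Int)) :=
  let edges := tcEdges n
  ((PySem.List.pyRange 0 ((2 : Int) ^ edges.length) 1).foldl (fun st bits =>
    let A := tcBuild n edges bits
    let min_key := (tcPerms n).foldl (fun mk perm =>
      let pkey := tcPkey n A perm
      if pkey < mk then pkey else mk) A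
    if PySem.Set.contains st.1 min_key then st
    else (PySem.Set.add st.1 min_key, st.2 ++ [A]))
    ((PySem.Set.empty : PySem.Set (List (List Int))), ([] : List (List (List Int))))).2

-- ===== PORT B =====
-- helper _isomorphic(A, rep, n): any perm with all A[perm[i]][perm[j]] == rep[i][j]
def tcIso (n : Int) (A rep : List (List Int)) : Bool :=
  (tcPerms n).any (fun perm =>
    (PySem.List.pyRange 0 n 1).all (fun i =>
      (PySem.List.pyRange 0 n 1).all (fun j =>
        tcEntry A perm i j == PySem.List.pyGetD (PySem.List.pyGetD rep i []) j 0)))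

def all_tournaments_canonical_alt (n : Int) : List (List (List Int)) :=
  let edges := tcEdges n
  (PySem.List.pyRange 0 ((2 : Int) ^ edges.length) 1).foldl (fun reps bits =>
    let A := tcBuild n edges bits
    if reps.any (fun rep => tcIso n A rep) then reps else reps ++ [A]) []

-- ===== PRECONDITION & SPEC =====
def Spec_all_tournaments_canonical (n : Int) (out : List (List (List Int))) : Prop := out = all_tournaments_canonical_alt n
instance (n : Int) (out : List (List (List Int))) : Decidable (Spec_all_tournaments_canonical n out) := by unfold Spec_all_tournaments_canonical; infer_instance

-- ===== CLAIM (what is proved, stated in full; the proofs are below) =====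
def Claim_equal_all_tournaments_canonical : Prop := ∀ (n : Int), Dom_all_tournaments_canonical n → Spec_all_tournaments_canonical n (all_tournaments_canonical n)

-- ===== LEMMAS AND PROOFS =====

-- proof-side abbreviations
def tcShape (n : Int) (A : List (List Int)) : Prop :=
  A.length = n.toNat ∧ ∀ r ∈ A, r.length = n.toNat

def tcCanon (n : Int) (A : List (List Int)) : List (List Int) :=
  (tcPerms n).foldl (fun mk perm =>
    let pkey := tcPkey n A perm
    if pkey < mk then pkey else mk) A

def tcComp (_n : Int) (p q : List Int) : List Int :=
  q.map (fun k => PySem.List.pyGetD p k 0)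

def tcInv (n : Int) (p : List Int) : List Int :=
  (PySem.List.pyRange 0 n 1).map (fun i => ((p.idxOf i : Nat) : Int))

-- matrix access toolbox
def tcGet (A : List (List Int)) (i j : Int) : Int :=
  PySem.List.pyGetD (PySem.List.pyGetD A i []) j 0

lemma tcGet_tcPkey (n : Int) (A : List (List Int)) (p : List Int) {i j : Int}
    (hi0 : 0 ≤ i) (hi1 : i < n) (hj0 : 0 ≤ j) (hj1 : j < n) :
    tcGet (tcPkey n A p) i j
      = tcGet A (PySem.List.pyGetD p i 0) (PySem.List.pyGetD p j 0) := by
  unfold tcPkey tcEntry tcGet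
  rw [PySem.List.pyGetD_map_pyRange_of_nonneg _ n i [] hi0 hi1,
      PySem.List.pyGetD_map_pyRange_of_nonneg _ n j 0 hj0 hj1]

lemma tcIdGet {n i : Int} (hi0 : 0 ≤ i) (hi1 : i < n) :
    PySem.List.pyGetD (PySem.List.pyRange 0 n 1) i 0 = i := by
  rw [PySem.List.pyGetD_eq_getElem _ _ hi0 (by simp [PySem.List.length_pyRange_one]; omega)]
  rw [PySem.List.getElem_pyRange_one]
  omega

lemma tcMapGet {f : Int → Int} {q : List Int} {i : Int} (hi0 : 0 ≤ i)
    (hi1 : i < q.length) :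
    PySem.List.pyGetD (q.map f) i 0 = f (PySem.List.pyGetD q i 0) := by
  rw [PySem.List.pyGetD_eq_getElem _ _ hi0 (by simpa using hi1),
      PySem.List.pyGetD_eq_getElem _ _ hi0 hi1, List.getElem_map]

lemma tcShape_ext {n : Int} {A B : List (List Int)}
    (hA : tcShape n A) (hB : tcShape n B)
    (h : ∀ i j : Nat, i < n.toNat → j < n.toNat →
      tcGet A i j = tcGet B i j) : A = B := by
  obtain ⟨hAl, hAr⟩ := hA; obtain ⟨hBl, hBr⟩ := hB
  apply List.ext_getElem (by omega)
  intro i hi hi'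
  have hiN : i < n.toNat := by omega
  apply List.ext_getElem
  · rw [hAr _ (List.getElem_mem hi), hBr _ (List.getElem_mem hi')]
  intro j hj hj'
  have hjN : j < n.toNat := by rw [hAr _ (List.getElem_mem hi)] at hj; omega
  have hstep := h i j hiN hjN
  unfold tcGet at hstep
  have eA : PySem.List.pyGetD A (i : Int) [] = A[i]'hi := by
    rw [PySem.List.pyGetD_eq_getElem _ _ (by positivity) (by exact_mod_cast by omega)]
    simp
  have eB : PySem.List.pyGetD B (i : Int) [] = B[i]'hi' := by
    rw [PySem.List.pyGetD_eq_getElem _ _ (by positivity) (by exact_mod_cast by omega)]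
    simp
  rw [eA, eB] at hstep
  rw [PySem.List.pyGetD_eq_getElem _ _ (by positivity) (by exact_mod_cast hj),
      PySem.List.pyGetD_eq_getElem _ _ (by positivity) (by exact_mod_cast hj')] at hstep
  simpa using hstep

-- edges membership
lemma mem_tcEdges {n i j : Int} (h : (i, j) ∈ tcEdges n) :
    0 ≤ i ∧ i < j ∧ j < n := by
  simp only [tcEdges, List.mem_flatMap, List.mem_map, PySem.List.mem_pyRange_one,
    Prod.mk.injEq] at h
  obtain ⟨a, ⟨ha0, ha1⟩, b, ⟨hb0, hb1⟩, hab⟩ := h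
  omega

-- shape of built matrices
lemma tcShape_step {n : Int} {A : List (List Int)} (hA : tcShape n A)
    {i j : Int} (hi : 0 ≤ i) (hj : 0 ≤ j) (hin : i < n) :
    tcShape n (PySem.List.pySetD A i (PySem.List.pySetD (PySem.List.pyGetD A i []) j 1)) := by
  obtain ⟨hlen, hrows⟩ := hA
  have hrow : PySem.List.pyGetD A i [] ∈ A :=
    PySem.List.pyGetD_mem A [] (by constructor <;> omega)
  rw [PySem.List.pySetD_of_nonneg _ _ hi, PySem.List.pySetD_of_nonneg _ _ hj]
  refine ⟨by simpa using hlen, ?_⟩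
  intro r hr
  rcases List.mem_or_eq_of_mem_set hr with h | rfl
  · exact hrows r h
  · simpa using hrows _ hrow

lemma tcShape_foldl {n bits : Int} :
    ∀ (l : List (Int × (Int × Int))) (A : List (List Int)), tcShape n A →
      (∀ e ∈ l, e.2 ∈ tcEdges n) →
      tcShape n (l.foldl (fun A e =>
        if PySem.Int.band (bits >>> e.1.toNat) 1 = 1 then
          PySem.List.pySetD A e.2.1 (PySem.List.pySetD (PySem.List.pyGetD A e.2.1 []) e.2.2 1)
        else
          PySem.List.pySetD A e.2.2 (PySem.List.pySetD (PySem.List.pyGetD A e.2.2 []) e.2.1 1)) A) := by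
  intro l
  induction l with
  | nil => intro A hA _; simpa using hA
  | cons e l ih =>
    intro A hA hmem
    simp only [List.foldl_cons]
    have he : e.2 ∈ tcEdges n := hmem e (by simp)
    obtain ⟨h0, h1, h2⟩ := mem_tcEdges (i := e.2.1) (j := e.2.2) (by simpa using he)
    refine ih _ ?_ (fun e' he' => hmem e' (by simp [he']))
    split
    · exact tcShape_step hA h0 (by omega) (by omega)
    · exact tcShape_step hA (by omega) h0 h2

lemma tcShape_tcBuild (n bits : Int) : tcShape n (tcBuild n (tcEdges n) bits) := by
  unfold tcBuild
  refine tcShape_foldl _ _ ?_ ?_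
  · constructor
    · simp [PySem.List.length_pyRange_one]
    · intro r hr
      simp only [List.mem_map] at hr
      obtain ⟨_, _, rfl⟩ := hr
      simp
  · intro e he
    have : e.2 ∈ (PySem.List.enumerate (tcEdges n) 0).map (·.2) := List.mem_map_of_mem he
    rwa [PySem.List.map_snd_enumerate] at this

lemma tcShape_tcPkey (n : Int) (A : List (List Int)) (p : List Int) :
    tcShape n (tcPkey n A p) := by
  constructor
  · simp [tcPkey, PySem.List.length_pyRange_one]
  · intro r hr
    simp only [tcPkey, List.mem_map] at hr
    obtain ⟨i, _, rfl⟩ := hr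
    simp [PySem.List.length_pyRange_one]

-- permutation list facts
lemma perm_of_mem_tcPerms {n : Int} {p : List Int} (h : p ∈ tcPerms n) :
    p.Perm (PySem.List.pyRange 0 n 1) :=
  PySem.List.perm_of_mem_permutations h

lemma mem_permutations_of_perm {α : Type} [DecidableEq α] :
    ∀ (p : List α) (xs : List α), xs.Nodup → p.Perm xs →
      p ∈ PySem.List.permutations xs xs.length := by
  intro p
  induction p with
  | nil =>
    intro xs _ hp
    have : xs = [] := (List.Perm.nil_eq hp).symm
    subst this
    simp
  | cons a p ih =>
    intro xs hnd hp
    have hlen : xs.length = p.length + 1 := by simpa using hp.length_eq.symm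
    have ha : a ∈ xs := hp.mem_iff.mp (by simp)
    obtain ⟨i, hi, hxi⟩ := List.mem_iff_getElem.mp ha
    have hperm_erase : (a :: xs.eraseIdx i).Perm xs := by
      simpa [hxi] using List.getElem_cons_eraseIdx_perm (l := xs) hi
    have hp' : p.Perm (xs.eraseIdx i) :=
      (List.perm_cons a).mp (hp.trans hperm_erase.symm)
    have hnd' : (xs.eraseIdx i).Nodup := hnd.eraseIdx i
    have hlen' : (xs.eraseIdx i).length = p.length := by
      rw [List.length_eraseIdx_of_lt hi, hlen]; rfl
    have hmem : p ∈ PySem.List.permutations (xs.eraseIdx i) (xs.eraseIdx i).length :=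
      ih _ hnd' hp'
    rw [hlen, PySem.List.permutations]
    refine List.mem_flatMap.mpr ⟨i, by simp only [List.mem_range]; omega, ?_⟩
    rw [List.getElem?_eq_getElem hi, hxi]
    simp only []
    exact List.mem_map.mpr ⟨p, by rwa [hlen'] at hmem, rfl⟩

lemma mem_tcPerms_of_perm {n : Int} {p : List Int}
    (h : p.Perm (PySem.List.pyRange 0 n 1)) : p ∈ tcPerms n :=
  mem_permutations_of_perm p _ (PySem.List.nodup_pyRange_one 0 n) h

lemma idP_mem_tcPerms (n : Int) : PySem.List.pyRange 0 n 1 ∈ tcPerms n :=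
  mem_tcPerms_of_perm (List.Perm.refl _)

lemma length_of_mem_tcPerms {n : Int} {p : List Int} (h : p ∈ tcPerms n) :
    p.length = n.toNat := by
  have := (perm_of_mem_tcPerms h).length_eq
  simpa [PySem.List.length_pyRange_one] using this

lemma pget_mem_range {n : Int} {p : List Int} (h : p ∈ tcPerms n) {i : Int}
    (h0 : 0 ≤ i) (h1 : i < n) :
    0 ≤ PySem.List.pyGetD p i 0 ∧ PySem.List.pyGetD p i 0 < n := by
  have hlen : p.length = n.toNat := length_of_mem_tcPerms h
  have hmem : PySem.List.pyGetD p i 0 ∈ p :=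
    PySem.List.pyGetD_mem p 0 (by constructor <;> omega)
  have := ((perm_of_mem_tcPerms h).mem_iff).mp hmem
  rw [PySem.List.mem_pyRange_one] at this
  exact this

-- identity action
lemma tcPkey_id {n : Int} {A : List (List Int)} (hA : tcShape n A) :
    tcPkey n A (PySem.List.pyRange 0 n 1) = A := by
  apply tcShape_ext (tcShape_tcPkey n A _) hA
  intro i j hi hj
  have hi1 : (i : Int) < n := by omega
  have hj1 : (j : Int) < n := by omega
  rw [tcGet_tcPkey n A _ (by positivity) hi1 (by positivity) hj1,
      tcIdGet (by positivity) hi1, tcIdGet (by positivity) hj1]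

-- composition
lemma tcPkey_comp {n : Int} (A : List (List Int)) {p q : List Int}
    (hq : q ∈ tcPerms n) :
    tcPkey n (tcPkey n A p) q = tcPkey n A (tcComp n p q) := by
  apply tcShape_ext (tcShape_tcPkey n _ _) (tcShape_tcPkey n _ _)
  intro i j hi hj
  have hi1 : (i : Int) < n := by omega
  have hj1 : (j : Int) < n := by omega
  have hqlen : q.length = n.toNat := length_of_mem_tcPerms hq
  obtain ⟨hqi0, hqi1⟩ := pget_mem_range hq (i := (i : Int)) (by positivity) hi1
  obtain ⟨hqj0, hqj1⟩ := pget_mem_range hq (i := (j : Int)) (by positivity) hj1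
  rw [tcGet_tcPkey n _ q (by positivity) hi1 (by positivity) hj1,
      tcGet_tcPkey n A p hqi0 hqi1 hqj0 hqj1,
      tcGet_tcPkey n A _ (by positivity) hi1 (by positivity) hj1]
  unfold tcComp
  rw [tcMapGet (by positivity) (by rw [hqlen]; omega),
      tcMapGet (by positivity) (by rw [hqlen]; omega)]

lemma tcComp_mem {n : Int} {p q : List Int} (hp : p ∈ tcPerms n)
    (hq : q ∈ tcPerms n) : tcComp n p q ∈ tcPerms n := by
  have hplen := length_of_mem_tcPerms hp
  have hqlen := length_of_mem_tcPerms hq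
  have hpnd : p.Nodup := (perm_of_mem_tcPerms hp).nodup_iff.mpr (PySem.List.nodup_pyRange_one 0 n)
  have hqnd : q.Nodup := (perm_of_mem_tcPerms hq).nodup_iff.mpr (PySem.List.nodup_pyRange_one 0 n)
  have hbound : ∀ a ∈ q, 0 ≤ a ∧ a < n := by
    intro a ha
    have := (perm_of_mem_tcPerms hq).mem_iff.mp ha
    rwa [PySem.List.mem_pyRange_one] at this
  have hval : ∀ a ∈ q, PySem.List.pyGetD p a 0 ∈ p := by
    intro a ha
    obtain ⟨h0, h1⟩ := hbound a ha
    exact PySem.List.pyGetD_mem p 0 (by constructor <;> omega)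
  apply mem_tcPerms_of_perm
  have hnd : (tcComp n p q).Nodup := by
    refine List.Nodup.map_on ?_ hqnd
    intro a ha b hb hfab
    obtain ⟨ha0, ha1⟩ := hbound a ha
    obtain ⟨hb0, hb1⟩ := hbound b hb
    rw [PySem.List.pyGetD_eq_getElem p 0 ha0 (by omega),
        PySem.List.pyGetD_eq_getElem p 0 hb0 (by omega)] at hfab
    have := (List.Nodup.getElem_inj_iff hpnd).mp hfab
    omega
  have hsub : tcComp n p q ⊆ PySem.List.pyRange 0 n 1 := by
    intro x hx
    obtain ⟨a, ha, rfl⟩ := List.mem_map.mp hx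
    have := (perm_of_mem_tcPerms hp).mem_iff.mp (hval a ha)
    exact this
  refine (List.subperm_of_subset hnd hsub).perm_of_length_le ?_
  simp [tcComp, PySem.List.length_pyRange_one, hqlen]

lemma tcInv_mem {n : Int} {p : List Int} (hp : p ∈ tcPerms n) :
    tcInv n p ∈ tcPerms n := by
  have hplen := length_of_mem_tcPerms hp
  have hmemp : ∀ i ∈ PySem.List.pyRange 0 n 1, i ∈ p := fun i hi =>
    (perm_of_mem_tcPerms hp).mem_iff.mpr hi
  apply mem_tcPerms_of_perm
  have hnd : (tcInv n p).Nodup := by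
    refine List.Nodup.map_on ?_ (PySem.List.nodup_pyRange_one 0 n)
    intro a ha b hb hfab
    have h1 : p[p.idxOf a]'(List.idxOf_lt_length_of_mem (hmemp a ha)) = a := List.getElem_idxOf _
    have h2 : p[p.idxOf b]'(List.idxOf_lt_length_of_mem (hmemp b hb)) = b := List.getElem_idxOf _
    have : p.idxOf a = p.idxOf b := by exact_mod_cast hfab
    rw [← h1, ← h2]
    congr 1
  have hsub : tcInv n p ⊆ PySem.List.pyRange 0 n 1 := by
    intro x hx
    obtain ⟨a, ha, rfl⟩ := List.mem_map.mp hx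
    have hlt : p.idxOf a < p.length := List.idxOf_lt_length_of_mem (hmemp a ha)
    rw [PySem.List.mem_pyRange_one]
    constructor
    · positivity
    · omega
  refine (List.subperm_of_subset hnd hsub).perm_of_length_le ?_
  simp [tcInv]

lemma tcComp_inv {n : Int} {p : List Int} (hp : p ∈ tcPerms n) :
    tcComp n p (tcInv n p) = PySem.List.pyRange 0 n 1 := by
  have hmemp : ∀ i ∈ PySem.List.pyRange 0 n 1, i ∈ p := fun i hi =>
    (perm_of_mem_tcPerms hp).mem_iff.mpr hi
  unfold tcComp tcInv
  rw [List.map_map]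
  have : ∀ i ∈ PySem.List.pyRange 0 n 1,
      ((fun k => PySem.List.pyGetD p k 0) ∘ fun i => ((p.idxOf i : Nat) : Int)) i = i := by
    intro i hi
    have hlt : p.idxOf i < p.length := List.idxOf_lt_length_of_mem (hmemp i hi)
    simp only [Function.comp_apply, PySem.List.pyGetD_natCast]
    rw [List.getD_eq_getElem _ _ hlt]
    exact List.getElem_idxOf _
  rw [List.map_congr_left this, List.map_id']

lemma tcPkey_inv {n : Int} {A : List (List Int)} {p : List Int}
    (hp : p ∈ tcPerms n) (hA : tcShape n A) :
    tcPkey n (tcPkey n A p) (tcInv n p) = A := by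
  rw [tcPkey_comp A (tcInv_mem hp), tcComp_inv hp, tcPkey_id hA]

-- canonical form via List.min?
lemma tc_if_min (a b : List (List Int)) : (if b < a then b else a) = min a b := by
  rcases lt_trichotomy b a with h|h|h
  · rw [if_pos h, min_eq_right h.le]
  · subst h; simp
  · rw [if_neg (not_lt.mpr h.le), min_eq_left h.le]

lemma tcCanon_eq_min? (n : Int) (A : List (List Int)) :
    (A :: (tcPerms n).map (fun p => tcPkey n A p)).min? = some (tcCanon n A) := by
  unfold tcCanon
  rw [List.min?_cons']
  congr 1
  rw [List.foldl_map]
  have hbody : (fun (mk : List (List Int)) (p : List Int) => min mk (tcPkey n A p))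
      = fun mk p => let pkey := tcPkey n A p; if pkey < mk then pkey else mk := by
    funext mk p
    exact (tc_if_min mk (tcPkey n A p)).symm
  rw [hbody]

lemma tcCanon_min_char (n : Int) (A : List (List Int)) :
    tcCanon n A ∈ A :: (tcPerms n).map (fun p => tcPkey n A p) ∧
    ∀ b ∈ A :: (tcPerms n).map (fun p => tcPkey n A p), tcCanon n A ≤ b :=
  List.min?_eq_some_iff.mp (tcCanon_eq_min? n A)

lemma tcCanon_mem_orbit {n : Int} {A : List (List Int)} (hA : tcShape n A) :
    ∃ p ∈ tcPerms n, tcPkey n A p = tcCanon n A := by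
  rcases List.mem_cons.mp (tcCanon_min_char n A).1 with h | h
  · exact ⟨PySem.List.pyRange 0 n 1, idP_mem_tcPerms n, by rw [tcPkey_id hA, h]⟩
  · obtain ⟨p, hp, hpe⟩ := List.mem_map.mp h
    exact ⟨p, hp, hpe⟩

lemma tcOrbit_mem_iff {n : Int} {A : List (List Int)} {p : List Int}
    (hA : tcShape n A) (hp : p ∈ tcPerms n) (x : List (List Int)) :
    x ∈ tcPkey n A p :: (tcPerms n).map (fun q => tcPkey n (tcPkey n A p) q) ↔
      x ∈ A :: (tcPerms n).map (fun q => tcPkey n A q) := by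
  constructor
  · intro hx
    rcases List.mem_cons.mp hx with rfl | hx
    · exact List.mem_cons.mpr (Or.inr (List.mem_map.mpr ⟨p, hp, rfl⟩))
    · obtain ⟨q, hq, rfl⟩ := List.mem_map.mp (by simpa using hx)
      rw [tcPkey_comp A hq]
      exact List.mem_cons.mpr (Or.inr (List.mem_map.mpr ⟨tcComp n p q, tcComp_mem hp hq, rfl⟩))
  · intro hx
    have hback : A = tcPkey n (tcPkey n A p) (tcInv n p) := (tcPkey_inv hp hA).symm
    rcases List.mem_cons.mp hx with rfl | hx
    · exact List.mem_cons.mpr (Or.inr (List.mem_map.mpr ⟨tcInv n p, tcInv_mem hp, hback.symm⟩))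
    · obtain ⟨q, hq, rfl⟩ := List.mem_map.mp hx
      refine List.mem_cons.mpr (Or.inr (List.mem_map.mpr
        ⟨tcComp n (tcInv n p) q, tcComp_mem (tcInv_mem hp) hq, ?_⟩))
      rw [← tcPkey_comp _ hq, tcPkey_inv hp hA]

lemma tcCanon_apply {n : Int} {A : List (List Int)} {p : List Int}
    (hA : tcShape n A) (hp : p ∈ tcPerms n) :
    tcCanon n (tcPkey n A p) = tcCanon n A := by
  obtain ⟨hm1, hle1⟩ := tcCanon_min_char n (tcPkey n A p)
  obtain ⟨hm2, hle2⟩ := tcCanon_min_char n A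
  exact le_antisymm (hle1 _ ((tcOrbit_mem_iff hA hp _).mpr hm2))
    (hle2 _ ((tcOrbit_mem_iff hA hp _).mp hm1))

lemma tcCanon_eq_iff_iso {n : Int} {A r : List (List Int)}
    (hA : tcShape n A) (hr : tcShape n r) :
    tcCanon n A = tcCanon n r ↔ ∃ p ∈ tcPerms n, tcPkey n A p = r := by
  constructor
  · intro h
    obtain ⟨p, hp, hpA⟩ := tcCanon_mem_orbit hA
    obtain ⟨q, hq, hqr⟩ := tcCanon_mem_orbit hr
    refine ⟨tcComp n p (tcInv n q), tcComp_mem hp (tcInv_mem hq), ?_⟩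
    rw [← tcPkey_comp A (tcInv_mem hq), hpA, h, ← hqr, tcPkey_inv hq hr]
  · rintro ⟨p, hp, rfl⟩
    exact (tcCanon_apply hA hp).symm

-- B's entrywise test is exactly "tcPkey n A p = r" on shaped r
lemma tcAllAll_iff {n : Int} {A r : List (List Int)} {p : List Int}
    (hr : tcShape n r) :
    ((PySem.List.pyRange 0 n 1).all (fun i =>
      (PySem.List.pyRange 0 n 1).all (fun j =>
        tcEntry A p i j == PySem.List.pyGetD (PySem.List.pyGetD r i []) j 0)) = true)
      ↔ tcPkey n A p = r := by
  have key : ∀ i j : Int, 0 ≤ i → i < n → 0 ≤ j → j < n →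
      tcEntry A p i j = tcGet (tcPkey n A p) i j := by
    intro i j hi0 hi1 hj0 hj1
    rw [tcGet_tcPkey n A p hi0 hi1 hj0 hj1]
    rfl
  simp only [List.all_eq_true, PySem.List.mem_pyRange_one, beq_iff_eq]
  constructor
  · intro h
    apply tcShape_ext (tcShape_tcPkey n A p) hr
    intro i j hi hj
    have hi1 : (i : Int) < n := by omega
    have hj1 : (j : Int) < n := by omega
    rw [← key _ _ (by positivity) hi1 (by positivity) hj1]
    exact h (i : Int) ⟨by positivity, hi1⟩ (j : Int) ⟨by positivity, hj1⟩
  · intro h i ⟨hi0, hi1⟩ j ⟨hj0, hj1⟩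
    rw [key i j hi0 hi1 hj0 hj1, h]
    rfl

lemma tcIso_iff {n : Int} {A r : List (List Int)} (hr : tcShape n r) :
    tcIso n A r = true ↔ ∃ p ∈ tcPerms n, tcPkey n A p = r := by
  unfold tcIso
  rw [List.any_eq_true]
  constructor
  · rintro ⟨p, hp, hall⟩
    exact ⟨p, hp, (tcAllAll_iff hr).mp hall⟩
  · rintro ⟨p, hp, heq⟩
    exact ⟨p, hp, (tcAllAll_iff hr).mpr heq⟩

-- the loop equivalence
def tcStepA (n : Int) (st : PySem.Set (List (List Int)) × List (List (List Int)))
    (bits : Int) : PySem.Set (List (List Int)) × List (List (List Int)) :=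
  if PySem.Set.contains st.1 (tcCanon n (tcBuild n (tcEdges n) bits)) then st
  else (PySem.Set.add st.1 (tcCanon n (tcBuild n (tcEdges n) bits)),
        st.2 ++ [tcBuild n (tcEdges n) bits])

def tcStepB (n : Int) (reps : List (List (List Int))) (bits : Int) :
    List (List (List Int)) :=
  if reps.any (fun rep => tcIso n (tcBuild n (tcEdges n) bits) rep) then reps
  else reps ++ [tcBuild n (tcEdges n) bits]

lemma tc_loop_eq' (n : Int) :
    ∀ (L : List Int) (seen : PySem.Set (List (List Int)))
      (results : List (List (List Int))),
      (∀ r ∈ results, tcShape n r) →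
      (∀ k, PySem.Set.contains seen k = true ↔ ∃ r ∈ results, tcCanon n r = k) →
      (L.foldl (tcStepA n) (seen, results)).2 = L.foldl (tcStepB n) results := by
  intro L
  induction L with
  | nil => intro seen results _ _; rfl
  | cons b L ih =>
    intro seen results hshape hseen
    simp only [List.foldl_cons]
    have hA : tcShape n (tcBuild n (tcEdges n) b) := tcShape_tcBuild n b
    have hcond : PySem.Set.contains seen (tcCanon n (tcBuild n (tcEdges n) b))
        = results.any (fun rep => tcIso n (tcBuild n (tcEdges n) b) rep) := by
      rw [Bool.eq_iff_iff, hseen, List.any_eq_true]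
      constructor
      · rintro ⟨r, hr, hcr⟩
        exact ⟨r, hr, (tcIso_iff (hshape r hr)).mpr
          ((tcCanon_eq_iff_iso hA (hshape r hr)).mp hcr.symm)⟩
      · rintro ⟨r, hr, hiso⟩
        exact ⟨r, hr, ((tcCanon_eq_iff_iso hA (hshape r hr)).mpr
          ((tcIso_iff (hshape r hr)).mp hiso)).symm⟩
    by_cases hx : results.any (fun rep => tcIso n (tcBuild n (tcEdges n) b) rep) = true
    · rw [show tcStepA n (seen, results) b = (seen, results) by
          unfold tcStepA; rw [hcond]; simp [hx],
        show tcStepB n results b = results by unfold tcStepB; simp [hx]]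
      exact ih seen results hshape hseen
    · rw [show tcStepA n (seen, results) b
          = (PySem.Set.add seen (tcCanon n (tcBuild n (tcEdges n) b)),
             results ++ [tcBuild n (tcEdges n) b]) by
          unfold tcStepA; rw [hcond]; simp [hx],
        show tcStepB n results b = results ++ [tcBuild n (tcEdges n) b] by
          unfold tcStepB; simp [hx]]
      refine ih _ _ ?_ ?_
      · intro r hr
        rcases List.mem_append.mp hr with h | h
        · exact hshape r h
        · rw [List.mem_singleton.mp h]; exact hA
      · intro k
        rw [PySem.Set.contains_iff, PySem.Set.mem_add]
        constructor
        · rintro (h | rfl)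
          · obtain ⟨r, hr, hcr⟩ := (hseen k).mp ((PySem.Set.contains_iff seen k).mpr h)
            exact ⟨r, List.mem_append.mpr (Or.inl hr), hcr⟩
          · exact ⟨tcBuild n (tcEdges n) b, List.mem_append.mpr (Or.inr (by simp)), rfl⟩
        · rintro ⟨r, hr, hcr⟩
          rcases List.mem_append.mp hr with h | h
          · exact Or.inl ((PySem.Set.contains_iff seen k).mp ((hseen k).mpr ⟨r, h, hcr⟩))
          · rw [List.mem_singleton.mp h] at hcr
            exact Or.inr hcr.symm

lemma tc_loop_eq (n : Int) :
    ∀ (L : List Int) (seen : PySem.Set (List (List Int)))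
      (results : List (List (List Int))),
      (∀ r ∈ results, tcShape n r) →
      (∀ k, PySem.Set.contains seen k = true ↔ ∃ r ∈ results, tcCanon n r = k) →
      (L.foldl (fun st bits =>
        let A := tcBuild n (tcEdges n) bits
        let min_key := (tcPerms n).foldl (fun mk perm =>
          let pkey := tcPkey n A perm
          if pkey < mk then pkey else mk) A
        if PySem.Set.contains st.1 min_key then st
        else (PySem.Set.add st.1 min_key, st.2 ++ [A])) (seen, results)).2
      = L.foldl (fun reps bits =>
          let A := tcBuild n (tcEdges n) bits
          if reps.any (fun rep => tcIso n A rep) then reps else reps ++ [A]) results := by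
  intro L seen results h1 h2
  exact tc_loop_eq' n L seen results h1 h2

-- ===== VERDICT (by name: the statement is the Claim_ definition above) =====
theorem all_tournaments_canonical_spec : Claim_equal_all_tournaments_canonical := by
  intro n _
  unfold Spec_all_tournaments_canonical all_tournaments_canonical all_tournaments_canonical_alt
  exact tc_loop_eq n _ PySem.Set.empty [] (by simp) (by simp [PySem.Set.empty])
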